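-- pv_equiv track=rewrite | github.com/wacotaqo/advent-of-code | 2023/python/day03/aoc2023_day03_p1.py | make_grids_NS_EW
-- ===== SOURCE A (Python) =====
-- def make_grids_NS_EW(input): ## Not used
--     gridEastWest = {}
--     gridNorthSouth = {}
--     y = 0
--     for row in input:
--         y += 1
--         items = [*row]
--         gridEastWest[y] = items
--         x = 0
--         for item in items:
--             x += 1
--             if not x in gridNorthSouth:
--                 gridNorthSouth[x] = [item]
--             else:
--                 gridNorthSouth[x].append(item)
--     return (gridEastWest, gridNorthSouth)
-- ===== SOURCE B (Python) =====
-- def make_grids_NS_EW(input):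
--     rows = [[*row] for row in input]
--     gridEastWest = dict(enumerate(rows, 1))
--     maxlen = max((len(r) for r in rows), default=0)
--     gridNorthSouth = {x: [r[x - 1] for r in rows if len(r) >= x]
--                       for x in range(1, maxlen + 1)}
--     return (gridEastWest, gridNorthSouth)
-- ===== Notes on version B (the rewrite author's own statement) =====
-- stated objective: simpler
-- what changed: Replaces A's single pass with per-character membership-tested dict updates by two separate comprehension-style passes: the row grid from enumerate(rows, 1) and the column grid built column-major over range(1, maxlen+1) with a jagged-row length filter.
import Mathlib
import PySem

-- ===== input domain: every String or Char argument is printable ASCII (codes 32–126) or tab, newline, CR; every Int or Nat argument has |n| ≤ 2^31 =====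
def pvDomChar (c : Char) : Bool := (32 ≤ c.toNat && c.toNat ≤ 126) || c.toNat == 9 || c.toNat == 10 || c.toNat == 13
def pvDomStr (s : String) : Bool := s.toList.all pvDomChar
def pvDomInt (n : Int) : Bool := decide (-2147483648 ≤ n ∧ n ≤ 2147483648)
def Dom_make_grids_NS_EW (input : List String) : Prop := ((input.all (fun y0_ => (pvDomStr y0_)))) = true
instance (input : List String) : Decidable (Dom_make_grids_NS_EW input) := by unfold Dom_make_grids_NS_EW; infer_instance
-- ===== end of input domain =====

-- B builds the same two grids in two separate passes (row grid by enumeration, column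
-- grid column-major over range(1, maxlen+1) with a jagged-row filter) instead of A's
-- single pass with per-character dict updates; objective: simpler decomposition.

-- ===== PORT A =====
-- inner loop body: `for item in items: x += 1; if not x in gridNorthSouth: … else: …`
def pvStepA_inner (p : PySem.Dict Int (List String) × Int) (item : String) :
    PySem.Dict Int (List String) × Int :=
  let x := p.2 + 1
  if !(p.1.contains x) then (p.1.insert x [item], x)
  else (p.1.modify x [] (fun v => v ++ [item]), x)

-- outer loop body: `for row in input: y += 1; items = [*row]; gridEastWest[y] = items; …`
def pvStepA (st : PySem.Dict Int (List String) × PySem.Dict Int (List String) × Int)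
    (row : String) : PySem.Dict Int (List String) × PySem.Dict Int (List String) × Int :=
  let y := st.2.2 + 1
  let items := row.toList.map (fun c => String.mk [c])
  let ew := st.1.insert y items
  let p := items.foldl pvStepA_inner (st.2.1, 0)
  (ew, p.1, y)

def make_grids_NS_EW (input : List String) : (List (Int × List String)) × (List (Int × List String)) :=
  let st := input.foldl pvStepA (PySem.Dict.empty, PySem.Dict.empty, 0)
  (st.1.items, st.2.1.items)

-- ===== PORT B =====
def make_grids_NS_EW_alt (input : List String) : (List (Int × List String)) × (List (Int × List String)) :=
  let rows := input.map (fun row => row.toList.map (fun c => String.mk [c]))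
  let gridEastWest := PySem.List.enumerate rows 1
  let maxlen := PySem.List.maxD (rows.map PySem.List.len) (fun v => v) 0
  let gridNorthSouth := (PySem.List.pyRange 1 (maxlen + 1) 1).map
    (fun x => (x, (rows.filter (fun r => x ≤ PySem.List.len r)).map
                    (fun r => PySem.List.pyGetD r (x - 1) "")))
  (gridEastWest, gridNorthSouth)

-- ===== PRECONDITION & SPEC =====
def Spec_make_grids_NS_EW (input : List String) (out : (List (Int × List String)) × (List (Int × List String))) : Prop := out = make_grids_NS_EW_alt input
instance (input : List String) (out : (List (Int × List String)) × (List (Int × List String))) : Decidable (Spec_make_grids_NS_EW input out) := by unfold Spec_make_grids_NS_EW; infer_instance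

-- ===== CLAIM (what is proved, stated in full; the proofs are below) =====
def Claim_equal_make_grids_NS_EW : Prop := ∀ (input : List String), Dom_make_grids_NS_EW input → Spec_make_grids_NS_EW input (make_grids_NS_EW input)

-- ===== LEMMAS AND PROOFS =====

-- the character list [*row] as a list of one-character strings (used only by the proofs)
-- length of the longest row
def pvMaxLen (rows : List (List String)) : Nat := rows.foldl (fun m r => max m r.length) 0

-- column i (0-based) of a jagged list of rows
def pvColVal (rows : List (List String)) (i : Nat) : List String := rows.filterMap (fun r => r[i]?)

-- the column grid as an association list, keys 1..maxlen in order
def pvCols (rows : List (List String)) : List (Int × List String) :=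
  (List.range (pvMaxLen rows)).map (fun (i : Nat) => ((i : Int) + 1, pvColVal rows i))

lemma pvMaxLen_acc (rows : List (List String)) (m : Nat) :
    rows.foldl (fun m r => max m r.length) m = max m (pvMaxLen rows) := by
  induction rows generalizing m with
  | nil => simp [pvMaxLen]
  | cons r rs ih =>
    rw [List.foldl_cons, ih]
    have h2 : pvMaxLen (r :: rs) = max r.length (pvMaxLen rs) := by
      rw [pvMaxLen, List.foldl_cons, Nat.zero_max, ih]
    rw [h2]; omega

lemma pvMaxLen_append_singleton (rows : List (List String)) (d : List String) :
    pvMaxLen (rows ++ [d]) = max (pvMaxLen rows) d.length := by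
  simp [pvMaxLen, List.foldl_append]

lemma length_le_pvMaxLen {rows : List (List String)} {r : List String} (h : r ∈ rows) :
    r.length ≤ pvMaxLen rows := by
  induction rows with
  | nil => simp at h
  | cons a rs ih =>
    rcases List.mem_cons.1 h with h | h
    · subst h; rw [pvMaxLen, List.foldl_cons, pvMaxLen_acc]; omega
    · have := ih h; rw [pvMaxLen, List.foldl_cons, pvMaxLen_acc]; simp [pvMaxLen] at this ⊢; omega

lemma pvColVal_append_singleton (rows : List (List String)) (d : List String) (i : Nat) :
    pvColVal (rows ++ [d]) i = pvColVal rows i ++ (d[i]?).toList := by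
  cases h : d[i]? <;> simp [pvColVal, List.filterMap_append, h]

lemma pvColVal_eq_nil (rows : List (List String)) (i : Nat) (h : pvMaxLen rows ≤ i) :
    pvColVal rows i = [] := by
  rw [pvColVal, List.filterMap_eq_nil_iff]
  intro r hr
  have := length_le_pvMaxLen hr
  simp; omega

lemma pvCols_append_nil (rows : List (List String)) :
    pvCols (rows ++ [[]]) = pvCols rows := by
  unfold pvCols
  rw [pvMaxLen_append_singleton]
  simp only [List.length_nil, Nat.max_zero]
  apply List.map_congr_left
  intro i _
  rw [pvColVal_append_singleton]; simp

lemma pvCols_nodup_keys (rows : List (List String)) :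
    ((PySem.Dict.mk (pvCols rows)).keys).Nodup := by
  rw [PySem.Dict.keys_mk, pvCols, List.map_map]
  have : ((fun x => x.1) ∘ fun (i : Nat) => ((i : Int) + 1, pvColVal rows i)) = fun (i:Nat) => ((i:Int)+1) := rfl
  rw [this]
  refine List.nodup_range.map ?_
  intro a b h
  simp only at h
  omega

lemma pvCols_contains (rows : List (List String)) (n : Nat) :
    (PySem.Dict.mk (pvCols rows)).contains ((n : Int) + 1) = decide (n < pvMaxLen rows) := by
  rw [PySem.Dict.contains_eq_decide_mem_keys, PySem.Dict.keys_mk, pvCols, List.map_map]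
  congr 1
  simp only [eq_iff_iff, List.mem_map, Function.comp, List.mem_range]
  constructor
  · rintro ⟨i, hi, h⟩; simp at h; omega
  · intro h; exact ⟨n, h, rfl⟩

-- one inner step, key already present (current column index below maxlen)
lemma pvInner_step_modify (rows : List (List String)) (done : List String) (a : String)
    (h : done.length < pvMaxLen rows) :
    pvStepA_inner (PySem.Dict.mk (pvCols (rows ++ [done])), (done.length : Int)) a
    = (PySem.Dict.mk (pvCols (rows ++ [done ++ [a]])), ((done.length : Int) + 1)) := by
  have hcon : (PySem.Dict.mk (pvCols (rows ++ [done]))).contains ((done.length : Int) + 1) = true := by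
    rw [pvCols_contains, pvMaxLen_append_singleton]
    simp; omega
  have hM : pvMaxLen (rows ++ [done]) = pvMaxLen rows := by
    rw [pvMaxLen_append_singleton]; omega
  have hmem : ((done.length : Int) + 1, pvColVal (rows ++ [done]) done.length)
      ∈ (PySem.Dict.mk (pvCols (rows ++ [done]))).items := by
    show _ ∈ pvCols (rows ++ [done])
    rw [pvCols]
    exact List.mem_map.2 ⟨done.length, List.mem_range.2 (by omega), rfl⟩
  have hgetD := PySem.Dict.getD_of_mem_items _ hmem (pvCols_nodup_keys _) []
  rw [pvStepA_inner]
  simp only [hcon, Bool.not_true, Bool.false_eq_true, ite_false]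
  refine congrArg₂ Prod.mk ?_ rfl
  rw [show ∀ (d : PySem.Dict Int (List String)) k f, d.modify k [] f = d.insert k (f (d.getD k []))
        from fun _ _ _ => rfl]
  apply PySem.Dict.ext
  rw [PySem.Dict.items_insert_of_contains _ _ hcon, hgetD]
  show (pvCols (rows ++ [done])).map _ = pvCols (rows ++ [done ++ [a]])
  rw [pvCols, pvCols, List.map_map, pvMaxLen_append_singleton, pvMaxLen_append_singleton]
  have hr1 : max (pvMaxLen rows) done.length = pvMaxLen rows := by omega
  have hr2 : max (pvMaxLen rows) (done ++ [a]).length = pvMaxLen rows := by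
    simp; omega
  rw [hr1, hr2]
  apply List.map_congr_left
  intro i hi
  rw [List.mem_range] at hi
  simp only [Function.comp]
  by_cases hieq : i = done.length
  · subst hieq
    simp only [beq_self_eq_true, if_pos]
    have h1 : pvColVal (rows ++ [done]) done.length = pvColVal rows done.length := by
      rw [pvColVal_append_singleton, List.getElem?_eq_none_iff.2 (le_refl _)]
      simp
    have h2 : pvColVal (rows ++ [done ++ [a]]) done.length = pvColVal rows done.length ++ [a] := by
      rw [pvColVal_append_singleton]
      have hga : (done ++ [a])[done.length]? = some a := by
        rw [List.getElem?_append_right (le_refl _)]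
        simp
      rw [hga]
      rfl
    rw [h1, h2]
  · have hne : (((i : Int) + 1) == ((done.length : Int) + 1)) = false := by
      simp; omega
    rw [hne]
    simp only [Bool.false_eq_true, ite_false]
    congr 1
    rw [pvColVal_append_singleton, pvColVal_append_singleton]
    congr 1
    by_cases hlt : i < done.length
    · congr 1
      rw [List.getElem?_append_left hlt]
    · have : done[i]? = none := List.getElem?_eq_none_iff.2 (by omega)
      have h2 : (done ++ [a])[i]? = none := List.getElem?_eq_none_iff.2 (by simp; omega)
      rw [this, h2]


-- one inner step, fresh key (current column index at or past maxlen)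
lemma pvInner_step_insert (rows : List (List String)) (done : List String) (a : String)
    (h : pvMaxLen rows ≤ done.length) :
    pvStepA_inner (PySem.Dict.mk (pvCols (rows ++ [done])), (done.length : Int)) a
    = (PySem.Dict.mk (pvCols (rows ++ [done ++ [a]])), ((done.length : Int) + 1)) := by
  have hcon : (PySem.Dict.mk (pvCols (rows ++ [done]))).contains ((done.length : Int) + 1) = false := by
    rw [pvCols_contains, pvMaxLen_append_singleton]
    simp; omega
  rw [pvStepA_inner]
  simp only [hcon, Bool.not_false, ite_true]
  refine congrArg₂ Prod.mk ?_ rfl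
  apply PySem.Dict.ext
  rw [PySem.Dict.items_insert_of_not_contains _ _ hcon]
  show pvCols (rows ++ [done]) ++ _ = pvCols (rows ++ [done ++ [a]])
  rw [pvCols, pvCols, pvMaxLen_append_singleton, pvMaxLen_append_singleton]
  have hr1 : max (pvMaxLen rows) done.length = done.length := by omega
  have hr2 : max (pvMaxLen rows) (done ++ [a]).length = done.length + 1 := by
    simp; omega
  rw [hr1, hr2, List.range_succ, List.map_append]
  congr 1
  · apply List.map_congr_left
    intro i hi
    rw [List.mem_range] at hi
    rw [pvColVal_append_singleton, pvColVal_append_singleton, List.getElem?_append_left hi]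
  · simp only [List.map_cons, List.map_nil]
    have : pvColVal (rows ++ [done ++ [a]]) done.length = [a] := by
      rw [pvColVal_append_singleton, pvColVal_eq_nil rows _ h]
      have hga : (done ++ [a])[done.length]? = some a := by
        rw [List.getElem?_append_right (le_refl _)]
        simp
      rw [hga]
      rfl
    rw [this]

-- the inner loop of A over the rest of the current row
lemma pvInner_loop (rows : List (List String)) (todo done : List String) :
    todo.foldl pvStepA_inner
      (PySem.Dict.mk (pvCols (rows ++ [done])), (done.length : Int))
    = (PySem.Dict.mk (pvCols (rows ++ [done ++ todo])),
       ((done.length + todo.length : Nat) : Int)) := by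
  induction todo generalizing done with
  | nil => simp
  | cons a todo ih =>
    rw [List.foldl_cons]
    by_cases h : done.length < pvMaxLen rows
    · rw [pvInner_step_modify rows done a h]
      have := ih (done ++ [a])
      simp only [List.length_append, List.length_cons, List.length_nil] at this ⊢
      rw [show ((done.length : Int) + 1) = (((done.length + 1 : Nat)) : Int) by push_cast; ring]
      rw [show done ++ a :: todo = (done ++ [a]) ++ todo by simp]
      rw [this]
      congr 1
      push_cast; ring_nf
    · rw [pvInner_step_insert rows done a (by omega)]
      have := ih (done ++ [a])
      simp only [List.length_append, List.length_cons, List.length_nil] at this ⊢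
      rw [show ((done.length : Int) + 1) = (((done.length + 1 : Nat)) : Int) by push_cast; ring]
      rw [show done ++ a :: todo = (done ++ [a]) ++ todo by simp]
      rw [this]
      congr 1
      push_cast; ring_nf

-- the character list [*row] as a list of one-character strings (used only by the proofs)
def pvItems (row : String) : List String := row.toList.map (fun c => String.mk [c])

lemma pvEW_not_contains (pre : List (List String)) :
    (PySem.Dict.mk (PySem.List.enumerate pre 1)).contains ((pre.length : Int) + 1) = false := by
  rw [PySem.Dict.contains_eq_decide_mem_keys, PySem.Dict.keys_mk]
  rw [PySem.List.map_fst_enumerate]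
  simp only [decide_eq_false_iff_not]
  intro hmem
  have := PySem.List.mem_pyRange_one.1 hmem
  omega

lemma pvOuter_loop (rest : List String) (pre : List (List String)) :
    rest.foldl pvStepA
      (PySem.Dict.mk (PySem.List.enumerate pre 1), PySem.Dict.mk (pvCols pre),
       (pre.length : Int))
    = (PySem.Dict.mk (PySem.List.enumerate (pre ++ rest.map pvItems) 1),
       PySem.Dict.mk (pvCols (pre ++ rest.map pvItems)),
       ((pre.length + rest.length : Nat) : Int)) := by
  induction rest generalizing pre with
  | nil => simp
  | cons row rest ih =>
    rw [List.foldl_cons]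
    have hstep : pvStepA (PySem.Dict.mk (PySem.List.enumerate pre 1), PySem.Dict.mk (pvCols pre),
        (pre.length : Int)) row
      = (PySem.Dict.mk (PySem.List.enumerate (pre ++ [pvItems row]) 1),
         PySem.Dict.mk (pvCols (pre ++ [pvItems row])),
         (((pre.length + 1 : Nat)) : Int)) := by
      rw [pvStepA]
      have hew : (PySem.Dict.mk (PySem.List.enumerate pre 1)).insert ((pre.length : Int) + 1)
            (row.toList.map (fun c => String.mk [c]))
          = PySem.Dict.mk (PySem.List.enumerate (pre ++ [pvItems row]) 1) := by
        apply PySem.Dict.ext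
        rw [PySem.Dict.items_insert_of_not_contains _ _ (pvEW_not_contains pre)]
        show PySem.List.enumerate pre 1 ++ _ = PySem.List.enumerate (pre ++ [pvItems row]) 1
        rw [PySem.List.enumerate_append]
        simp [PySem.List.enumerate, pvItems]
        ring
      have hns : (row.toList.map (fun c => String.mk [c])).foldl pvStepA_inner
            (PySem.Dict.mk (pvCols pre), 0)
          = (PySem.Dict.mk (pvCols (pre ++ [pvItems row])),
             ((pvItems row).length : Int)) := by
        have h0 : (PySem.Dict.mk (pvCols pre), (0 : Int))
            = (PySem.Dict.mk (pvCols (pre ++ [([] : List String)])), ((List.length ([] : List String) : Nat) : Int)) := by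
          rw [pvCols_append_nil]; simp
        rw [show (row.toList.map (fun c => String.mk [c])) = pvItems row from rfl, h0,
            pvInner_loop pre (pvItems row) []]
        simp
      simp only [hew, hns]
      refine congrArg₂ Prod.mk rfl (congrArg₂ Prod.mk rfl ?_)
      push_cast; ring
    rw [hstep, show ((pre.length + 1 : Nat)) = (pre ++ [pvItems row]).length by simp, ih]
    simp
    omega

lemma pvA_closed (input : List String) :
    make_grids_NS_EW input
      = (PySem.List.enumerate (input.map pvItems) 1, pvCols (input.map pvItems)) := by
  rw [make_grids_NS_EW]
  have h0 : (PySem.Dict.empty, PySem.Dict.empty, (0 : Int))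
      = (PySem.Dict.mk (PySem.List.enumerate ([] : List (List String)) 1),
         PySem.Dict.mk (pvCols ([] : List (List String))),
         ((List.length ([] : List (List String)) : Nat) : Int)) := by
    simp [PySem.Dict.empty, PySem.List.enumerate, pvCols, pvMaxLen]
  rw [h0, pvOuter_loop]
  simp

lemma pvFoldMax_cast (t : List (List String)) (m : Nat) :
    (t.map PySem.List.len).foldl max ((m : Nat) : Int)
      = ((t.foldl (fun m r => max m r.length) m : Nat) : Int) := by
  induction t generalizing m with
  | nil => simp
  | cons r tl ih =>
    simp only [List.map_cons, List.foldl_cons, PySem.List.len_eq]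
    rw [show max ((m : Nat) : Int) ((r.length : Nat) : Int) = (((max m r.length : Nat)) : Int) by
      rw [Nat.cast_max]]
    exact ih (max m r.length)

lemma pvMaxD_len (rows : List (List String)) :
    PySem.List.maxD (rows.map PySem.List.len) (fun v => v) 0 = ((pvMaxLen rows : Nat) : Int) := by
  cases rows with
  | nil => simp [PySem.List.maxD, PySem.List.max?, pvMaxLen]
  | cons r t =>
    rw [PySem.List.maxD, List.map_cons, PySem.List.max?_id_cons]
    simp only [Option.getD_some, PySem.List.len_eq]
    rw [pvFoldMax_cast t r.length, pvMaxLen, List.foldl_cons, Nat.zero_max]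

lemma pvRange_one_succ (K : Nat) :
    PySem.List.pyRange 1 ((K : Int) + 1) 1 = (List.range K).map (fun (i : Nat) => ((i : Int) + 1)) := by
  rw [PySem.List.pyRange]
  simp only [if_neg one_ne_zero]
  rcases Nat.eq_zero_or_pos K with hK | hK
  · subst hK; simp
  · rw [if_pos (by omega), if_pos (by exact_mod_cast by omega)]
    have : (((K : Int) + 1 - 1 + 1 - 1) / 1).toNat = K := by simp
    rw [this]
    apply List.map_congr_left
    intro i _
    ring

lemma pvColumn_filter (rows : List (List String)) (i : Nat) :
    (rows.filter (fun r => ((i : Int) + 1) ≤ PySem.List.len r)).map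
      (fun r => PySem.List.pyGetD r (((i : Int) + 1) - 1) "")
    = pvColVal rows i := by
  induction rows with
  | nil => simp [pvColVal]
  | cons r t ih =>
    rw [pvColVal, List.filterMap_cons]
    by_cases h : i < r.length
    · rw [List.filter_cons_of_pos (by simp [PySem.List.len_eq]; omega), List.map_cons, ih]
      have hsome : r[i]? = some r[i] := List.getElem?_eq_getElem h
      rw [hsome]
      have : PySem.List.pyGetD r (((i : Int) + 1) - 1) "" = r[i] := by
        rw [show ((i : Int) + 1 - 1) = ((i : Nat) : Int) by ring]
        rw [PySem.List.pyGetD_natCast]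
        exact List.getD_eq_getElem r "" h
      rw [this, pvColVal]
    · rw [List.filter_cons_of_neg (by simp [PySem.List.len_eq]; omega), ih]
      rw [List.getElem?_eq_none_iff.2 (by omega), pvColVal]

lemma pvB_closed (input : List String) :
    make_grids_NS_EW_alt input
      = (PySem.List.enumerate (input.map pvItems) 1, pvCols (input.map pvItems)) := by
  rw [make_grids_NS_EW_alt]
  refine congrArg₂ Prod.mk rfl ?_
  show (PySem.List.pyRange 1 (PySem.List.maxD ((input.map pvItems).map PySem.List.len) (fun v => v) 0 + 1) 1).map _
      = pvCols (input.map pvItems)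
  rw [pvMaxD_len, pvRange_one_succ, pvCols, List.map_map]
  apply List.map_congr_left
  intro i _
  simp only [Function.comp]
  exact congrArg₂ Prod.mk rfl (pvColumn_filter (input.map pvItems) i)


-- ===== VERDICT (by name: the statement is the Claim_ definition above) =====
theorem make_grids_NS_EW_spec : Claim_equal_make_grids_NS_EW := by
  intro input _
  unfold Spec_make_grids_NS_EW
  rw [pvA_closed, pvB_closed]
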